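-- pv_equiv track=rewrite | github.com/Anupam-Roy16/Leetcode_Solutions | 4011-smallest-absent-positive-greater-than-average/4011-smallest-absent-positive-greater-than-average.py | smallestAbsent
-- ===== SOURCE A (Python) =====
-- from typing import List
--
-- def smallestAbsent(nums: List[int]) -> int:
--     average = sum(nums)//len(nums)
--     if average < 0:
--         check_number = 1
--     else:
--         check_number = average + 1
--     nums = set(nums)
--     while True:
--         if check_number not in nums:
--             return check_number
--             break
--         check_number+=1
-- ===== SOURCE B (Python) =====
-- def smallestAbsent(nums):
--     average = sum(nums) // len(nums)
--     cand = 1 if average < 0 else average + 1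
--     for v in sorted(set(nums)):
--         if v < cand:
--             continue
--         if v == cand:
--             cand += 1
--         else:
--             break
--     return cand
-- ===== Notes on version B (the rewrite author's own statement) =====
-- stated objective: alternative
-- what changed: Replaces the unbounded while-loop doing repeated set-membership probes with a single ordered walk over sorted(set(nums)) that advances a candidate and stops at the first gap.
import Mathlib
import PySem

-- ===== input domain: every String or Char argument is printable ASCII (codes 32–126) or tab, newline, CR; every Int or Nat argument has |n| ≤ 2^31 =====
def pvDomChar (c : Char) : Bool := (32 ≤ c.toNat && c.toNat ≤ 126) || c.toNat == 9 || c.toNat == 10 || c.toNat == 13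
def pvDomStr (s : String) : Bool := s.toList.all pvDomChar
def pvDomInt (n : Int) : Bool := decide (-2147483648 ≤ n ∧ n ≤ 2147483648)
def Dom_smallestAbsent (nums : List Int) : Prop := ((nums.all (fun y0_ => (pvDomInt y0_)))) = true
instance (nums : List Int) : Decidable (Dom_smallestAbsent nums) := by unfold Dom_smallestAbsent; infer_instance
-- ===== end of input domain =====

-- B replaces A's unbounded membership-probing scan with a single walk over sorted(set(nums)); proved equal on nonempty lists.

-- termination helpers for A's while-loop (cited by name in decreasing_by)
theorem pvFilterMono (t : List Int) (c : Int) :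
    (t.filter (fun x => c + 1 ≤ x)).length ≤ (t.filter (fun x => c ≤ x)).length := by
  induction t with
  | nil => simp
  | cons a t ih =>
    simp only [List.filter_cons]
    split_ifs with h1 h2
    · simpa using ih
    · simp only [decide_eq_true_eq] at h1 h2; omega
    · simp only [List.length_cons]; omega
    · exact ih

theorem pvFilterLt (s : List Int) (c : Int) (h : c ∈ s) :
    (s.filter (fun x => c + 1 ≤ x)).length < (s.filter (fun x => c ≤ x)).length := by
  induction s with
  | nil => simp at h
  | cons a t ih =>
    simp only [List.filter_cons]
    rcases List.mem_cons.mp h with rfl | ht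
    · rw [if_neg (by simp), if_pos (by simp)]
      exact Nat.lt_succ_of_le (pvFilterMono t c)
    · have hlt := ih ht
      split_ifs with h1 h2
      · simp only [List.length_cons]; omega
      · simp only [decide_eq_true_eq] at h1 h2; omega
      · simp only [List.length_cons]; omega
      · exact hlt

-- ===== PORT A =====
def smallestAbsentLoop (s : PySem.Set Int) (check : Int) : Int :=
  if h : check ∈ s then
    smallestAbsentLoop s (check + 1)
  else check
termination_by (s.filter (fun x => check ≤ x)).length
decreasing_by exact pvFilterLt s check h

def smallestAbsent (nums : List Int) : Int :=
  let average := PySem.Int.floordiv nums.sum nums.length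
  let check := if average < 0 then 1 else average + 1
  smallestAbsentLoop (PySem.Set.ofList nums) check

-- ===== PORT B =====
def smallestAbsentWalk : List Int → Int → Int
  | [], cand => cand
  | v :: rest, cand =>
    if v < cand then smallestAbsentWalk rest cand
    else if v = cand then smallestAbsentWalk rest (cand + 1)
    else cand

def smallestAbsent_alt (nums : List Int) : Int :=
  let average := PySem.Int.floordiv nums.sum nums.length
  let cand := if average < 0 then 1 else average + 1
  smallestAbsentWalk (PySem.List.sorted (PySem.Set.ofList nums) (fun x => x) false) cand

-- ===== PRECONDITION & SPEC =====
-- Pre_ excludes only the empty list, on which A raises ZeroDivisionError (sum(nums)//len(nums)); B raises there too.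
def Pre_smallestAbsent (nums : List Int) : Prop := nums ≠ []
instance (nums : List Int) : Decidable (Pre_smallestAbsent nums) := by unfold Pre_smallestAbsent; infer_instance
def pvWitness_smallestAbsent : List Int := [3, 1, 2]

def Spec_smallestAbsent (nums : List Int) (out : Int) : Prop := out = smallestAbsent_alt nums
instance (nums : List Int) (out : Int) : Decidable (Spec_smallestAbsent nums out) := by unfold Spec_smallestAbsent; infer_instance

-- ===== CLAIM (what is proved, stated in full; the proofs are below) =====
def Claim_equal_smallestAbsent : Prop := ∀ (nums : List Int), Dom_smallestAbsent nums → Pre_smallestAbsent nums → Spec_smallestAbsent nums (smallestAbsent nums)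

-- ===== LEMMAS AND PROOFS =====

-- characterization: r is the least integer ≥ start absent from nums
def pvLeast (nums : List Int) (start r : Int) : Prop :=
  start ≤ r ∧ r ∉ nums ∧ ∀ c, start ≤ c → c < r → c ∈ nums

theorem pvLeast_unique (nums : List Int) (start r r' : Int)
    (h : pvLeast nums start r) (h' : pvLeast nums start r') : r = r' := by
  obtain ⟨h1, h2, h3⟩ := h
  obtain ⟨h1', h2', h3'⟩ := h'
  by_contra hne
  rcases lt_or_gt_of_ne hne with hlt | hgt
  · exact h2 (h3' r h1 hlt)
  · exact h2' (h3 r' h1' hgt)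

theorem pvLoopA_spec (nums : List Int) (start : Int) :
    pvLeast nums start (smallestAbsentLoop (PySem.Set.ofList nums) start) := by
  generalize hs : PySem.Set.ofList nums = s
  have hmem : ∀ x : Int, x ∈ s ↔ x ∈ nums := by
    intro x; rw [← hs]; exact PySem.Set.mem_ofList nums x
  clear hs
  induction start using smallestAbsentLoop.induct s with
  | case1 check h ih =>
    rw [smallestAbsentLoop, dif_pos h]
    obtain ⟨i1, i2, i3⟩ := ih
    refine ⟨by omega, i2, ?_⟩
    intro c hc1 hc2
    by_cases hc : c = check
    · exact (hmem c).mp (hc ▸ h)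
    · exact i3 c (by omega) hc2
  | case2 check h =>
    rw [smallestAbsentLoop, dif_neg h]
    exact ⟨le_refl _, fun hx => h ((hmem check).mpr hx), fun c h1 h2 => absurd h1 (by omega)⟩

theorem pvWalk_spec (nums : List Int) (l : List Int) (cand : Int)
    (hsort : l.Pairwise (· < ·))
    (hmem : ∀ x : Int, cand ≤ x → (x ∈ nums ↔ x ∈ l)) :
    pvLeast nums cand (smallestAbsentWalk l cand) := by
  induction l generalizing cand with
  | nil =>
    simp only [smallestAbsentWalk]
    refine ⟨le_refl _, ?_, ?_⟩
    · intro h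
      simpa using (hmem cand (le_refl _)).mp h
    · intro c h1 h2; omega
  | cons v rest ih =>
    rcases List.pairwise_cons.mp hsort with ⟨hv, hrest⟩
    by_cases h1 : v < cand
    · rw [smallestAbsentWalk, if_pos h1]
      refine ih cand hrest ?_
      intro x hx
      rw [hmem x hx, List.mem_cons]
      constructor
      · rintro (rfl | h)
        · exact absurd hx (by omega)
        · exact h
      · exact Or.inr
    · by_cases h2 : v = cand
      · rw [smallestAbsentWalk, if_neg h1, if_pos h2]
        have hmem' : ∀ x : Int, cand + 1 ≤ x → (x ∈ nums ↔ x ∈ rest) := by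
          intro x hx
          rw [hmem x (by omega), List.mem_cons]
          constructor
          · rintro (rfl | h)
            · exact absurd hx (by omega)
            · exact h
          · exact Or.inr
        obtain ⟨i1, i2, i3⟩ := ih (cand + 1) hrest hmem'
        refine ⟨by omega, i2, ?_⟩
        intro c hc1 hc2
        by_cases hc : c = cand
        · subst hc; exact (hmem c (le_refl _)).mpr (by simp [h2])
        · exact i3 c (by omega) hc2
      · rw [smallestAbsentWalk, if_neg h1, if_neg h2]
        refine ⟨le_refl _, ?_, fun c hc1 hc2 => absurd hc1 (by omega)⟩
        intro h
        rcases List.mem_cons.mp ((hmem cand (le_refl _)).mp h) with h | h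
        · exact h2 h.symm
        · have := hv cand h; omega

-- ===== VERDICT (by name: the statement is the Claim_ definition above) =====
theorem smallestAbsent_spec : Claim_equal_smallestAbsent := by
  intro nums _ _
  unfold Spec_smallestAbsent smallestAbsent smallestAbsent_alt
  set start := if PySem.Int.floordiv nums.sum nums.length < 0 then (1 : Int)
    else PySem.Int.floordiv nums.sum nums.length + 1 with hstart
  apply pvLeast_unique nums start
  · exact pvLoopA_spec nums start
  · apply pvWalk_spec
    · exact PySem.List.sorted_ofList_pairwise_lt nums
    · intro x _
      rw [PySem.List.mem_sorted]
      exact (PySem.Set.mem_ofList nums x).symm
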